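-- pv_equiv track=rewrite | github.com/gon2gon2/jungle-week1-4 | week02/징검다리.py | remove_rocks
-- ===== SOURCE A (Python) =====
-- def remove_rocks(rocks, interval, n):
--     '''
--     rocks : 현재 바위들
--     interval: 최소 간격, 이것보다 작으면 remove할 거임
--     n: 없앨 바위 수, 이거보다 많이 제거했으면 return False
--     '''
--     idx = 0
--     popped = 0
--     temp_rocks = rocks[:]
--     while temp_rocks and idx < len(temp_rocks)-1:
--         now = temp_rocks[idx]
--         right = temp_rocks[idx+1]
--
--         if right - now < interval:
--             temp_rocks.pop(idx+1)
--             popped += 1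
--             continue
--         else:
--             idx += 1
--
--     # 한두개만 뽑아도 interval을 만족시켜서 더 이상 안 뽑는 경우
--     if popped < n:
--         for i in range(len(temp_rocks)-1):
--             if temp_rocks[i+1] - temp_rocks[i] < interval:
--                 return popped
--         else:
--             popped = n
--
--
--
--     return popped
-- ===== SOURCE B (Python) =====
-- def remove_rocks(rocks, interval, n):
--     # Single greedy pass: keep the last kept rock, count removals; result is max(removals, n).
--     popped = 0
--     if rocks:
--         last = rocks[0]
--         for r in rocks[1:]:
--             if r - last < interval:
--                 popped += 1
--             else:
--                 last = r
--     return max(popped, n)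
-- ===== Notes on version B (the rewrite author's own statement) =====
-- stated objective: faster
-- what changed: Replaces the while-loop with O(n) list.pop calls plus a full re-scan by a single greedy pass that tracks the last kept rock and returns max(removals, n) directly.
import Mathlib
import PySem

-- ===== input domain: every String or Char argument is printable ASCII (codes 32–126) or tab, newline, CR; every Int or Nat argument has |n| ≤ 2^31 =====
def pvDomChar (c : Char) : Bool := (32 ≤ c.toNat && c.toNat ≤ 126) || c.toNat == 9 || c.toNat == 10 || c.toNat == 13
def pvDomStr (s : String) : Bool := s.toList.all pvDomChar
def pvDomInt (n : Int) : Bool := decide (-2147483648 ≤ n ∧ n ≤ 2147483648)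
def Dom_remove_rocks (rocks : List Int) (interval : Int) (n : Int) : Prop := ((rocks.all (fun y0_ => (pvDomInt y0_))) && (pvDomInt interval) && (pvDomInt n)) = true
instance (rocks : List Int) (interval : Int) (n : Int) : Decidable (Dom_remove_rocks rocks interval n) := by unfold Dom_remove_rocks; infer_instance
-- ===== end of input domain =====

-- B replaces A's pop-in-place while loop and re-scan by one greedy pass returning max(removals, n); measured asymptotically faster.

-- ===== PORT A =====
-- the while loop: 'temp_rocks and idx < len(temp_rocks)-1' is (for Nat idx) exactly 'idx+1 < temp.length';
-- temp_rocks.pop(idx+1) (value discarded) is eraseIdx (idx+1); indexing is in range by the loop guard.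
def loopA (interval : Int) (fuel : Nat) (temp : List Int) (idx : Nat) (popped : Int) : List Int × Int :=
  match fuel with
  | 0 => (temp, popped)  -- never reached: the caller supplies enough fuel (the loop runs at most len(rocks) times)
  | fuel + 1 =>
    if h : idx + 1 < temp.length then
      let now := temp[idx]
      let right := temp[idx + 1]
      if right - now < interval then
        loopA interval fuel (temp.eraseIdx (idx + 1)) idx (popped + 1)
      else
        loopA interval fuel temp (idx + 1) popped
    else
      (temp, popped)

-- 'for i in range(len(temp_rocks)-1): if temp_rocks[i+1]-temp_rocks[i] < interval: return popped'
-- : scan adjacent pairs, report whether an early return fires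
def anyClose (interval : Int) : List Int → Bool
  | x :: y :: rest => if y - x < interval then true else anyClose interval (y :: rest)
  | _ => false

def remove_rocks (rocks : List Int) (interval : Int) (n : Int) : Int :=
  let r := loopA interval (rocks.length + 1) rocks 0 0
  if r.2 < n then
    if anyClose interval r.1 then r.2 else n
  else
    r.2

-- ===== PORT B =====
def bLoop (interval : Int) (last : Int) (rest : List Int) (popped : Int) : Int :=
  match rest with
  | [] => popped
  | r :: rs =>
    if r - last < interval then bLoop interval last rs (popped + 1)
    else bLoop interval r rs popped

def remove_rocks_alt (rocks : List Int) (interval : Int) (n : Int) : Int :=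
  let popped := match rocks with
    | [] => 0
    | x :: xs => bLoop interval x xs 0
  max popped n

-- ===== PRECONDITION & SPEC =====
def Spec_remove_rocks (rocks : List Int) (interval : Int) (n : Int) (out : Int) : Prop := out = remove_rocks_alt rocks interval n
instance (rocks : List Int) (interval : Int) (n : Int) (out : Int) : Decidable (Spec_remove_rocks rocks interval n out) := by unfold Spec_remove_rocks; infer_instance

-- ===== CLAIM (what is proved, stated in full; the proofs are below) =====
def Claim_equal_remove_rocks : Prop := ∀ (rocks : List Int) (interval : Int) (n : Int), Dom_remove_rocks rocks interval n → Spec_remove_rocks rocks interval n (remove_rocks rocks interval n)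

-- ===== LEMMAS AND PROOFS =====

-- reference greedy: kept suffix and number of removals, recursion on the tail
def greedy (interval : Int) (last : Int) : List Int → List Int × Int
  | [] => ([], 0)
  | r :: rs =>
    if r - last < interval then
      let p := greedy interval last rs
      (p.1, p.2 + 1)
    else
      let p := greedy interval r rs
      (r :: p.1, p.2)

lemma eraseIdx_append_cons_cons (pref : List Int) (a b : Int) (rs : List Int) :
    (pref ++ a :: b :: rs).eraseIdx (pref.length + 1) = pref ++ a :: rs := by
  induction pref with
  | nil => simp [List.eraseIdx]
  | cons x xs ih => simp [ih]

lemma getElem_append_cons (pref : List Int) (a : Int) (rs : List Int)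
    (h : pref.length < (pref ++ a :: rs).length) :
    (pref ++ a :: rs)[pref.length] = a := by
  rw [List.getElem_append_right (by omega)]
  simp

lemma loopA_eq_greedy (interval : Int) (rest : List Int) :
    ∀ (fuel : Nat) (pref : List Int) (last : Int) (popped : Int), rest.length + 1 ≤ fuel →
      loopA interval fuel (pref ++ last :: rest) pref.length popped =
        (pref ++ last :: (greedy interval last rest).1, popped + (greedy interval last rest).2) := by
  induction rest with
  | nil =>
    intro fuel pref last popped hf
    obtain ⟨f, rfl⟩ : ∃ f, fuel = f + 1 := ⟨fuel - 1, by omega⟩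
    rw [loopA]
    simp [greedy]
  | cons r rs ih =>
    intro fuel pref last popped hf
    obtain ⟨f, rfl⟩ : ∃ f, fuel = f + 1 := ⟨fuel - 1, by omega⟩
    simp only [List.length_cons] at hf
    rw [loopA]
    have hlen : pref.length + 1 < (pref ++ last :: r :: rs).length := by simp
    rw [dif_pos hlen]
    have h1 : (pref ++ last :: r :: rs)[pref.length]'(by simp) = last :=
      getElem_append_cons pref last (r :: rs) (by simp)
    have h2 : (pref ++ last :: r :: rs)[pref.length + 1]'hlen = r := by
      rw [List.getElem_append_right (by omega)]
      simp
    simp only [h1, h2]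
    by_cases hc : r - last < interval
    · rw [if_pos hc, eraseIdx_append_cons_cons, ih f pref last (popped + 1) (by omega)]
      simp [greedy, hc]
      omega
    · rw [if_neg hc]
      have hpl : pref.length + 1 = (pref ++ [last]).length := by simp
      have : pref ++ last :: r :: rs = (pref ++ [last]) ++ r :: rs := by simp
      rw [this, hpl, ih f (pref ++ [last]) r popped (by omega)]
      simp [greedy, hc]

lemma anyClose_greedy (interval : Int) (rest : List Int) :
    ∀ last : Int, anyClose interval (last :: (greedy interval last rest).1) = false := by
  induction rest with
  | nil => intro last; simp [greedy, anyClose]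
  | cons r rs ih =>
    intro last
    by_cases hc : r - last < interval
    · simp [greedy, hc, ih last]
    · simp [greedy, hc, anyClose, ih r]

lemma bLoop_eq_greedy (interval : Int) (rest : List Int) :
    ∀ (last popped : Int), bLoop interval last rest popped = popped + (greedy interval last rest).2 := by
  induction rest with
  | nil => intro last popped; simp [bLoop, greedy]
  | cons r rs ih =>
    intro last popped
    by_cases hc : r - last < interval
    · simp [bLoop, greedy, hc, ih]; omega
    · simp [bLoop, greedy, hc, ih]

-- ===== VERDICT (by name: the statement is the Claim_ definition above) =====
theorem remove_rocks_spec : Claim_equal_remove_rocks := by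
  intro rocks interval n _
  unfold Spec_remove_rocks remove_rocks remove_rocks_alt
  cases rocks with
  | nil =>
    rw [loopA]
    simp [anyClose]
    omega
  | cons x xs =>
    have hl := loopA_eq_greedy interval xs ((x :: xs).length + 1) ([] : List Int) x 0 (by simp)
    simp only [List.nil_append, List.length_nil] at hl
    rw [hl]
    simp only [bLoop_eq_greedy, anyClose_greedy, zero_add, if_false, Bool.false_eq_true]
    split_ifs with h1
    · exact (max_eq_right h1.le).symm
    · exact (max_eq_left (not_lt.1 h1)).symm
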